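-- pv_equiv track=rewrite | github.com/JunmingZhang/CSC384 | Assignment/A3/csp_code/kenken_csp.py | div_check
-- ===== SOURCE A (Python) =====
-- import itertools
--
-- def div_check(assgns, target):
-- 	'''
-- 	check if the assignment satisfies the kenken cage constraint
-- 	for division operation
-- 	'''
--
-- 	# check all permuatations indeed of assignments, since
-- 	# for division, there is no commutative property
-- 	# and the assignmnents satisfies the kenken constraint
-- 	# if one permutation satisfies the kenken constraint
-- 	all_perms = itertools.permutations(assgns)
-- 	for perm in all_perms:
-- 		quotient = perm[0]
-- 		for ind in range(1, len(assgns)):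
-- 			quotient //= perm[ind]
-- 		if quotient == target:
-- 			return True
-- 	return False
-- ===== SOURCE B (Python) =====
-- def div_check(assgns, target):
--     # Level-by-level search over deduplicated states (remaining-elements tuple, quotient so far)
--     # instead of enumerating all n! permutations.
--     a = tuple(assgns)
--     states = {(a[:i] + a[i + 1:], v) for i, v in enumerate(a)}
--     for _ in range(len(a) - 1):
--         nxt = set()
--         for rem, val in states:
--             for j, d in enumerate(rem):
--                 nxt.add((rem[:j] + rem[j + 1:], val // d))
--         states = nxt
--     return any(val == target for _, val in states)
-- ===== Notes on version B (the rewrite author's own statement) =====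
-- stated objective: alternative
-- what changed: Replaces A's enumeration of all n! permutations by a breadth-first search over deduplicated (remaining-elements, quotient-so-far) states, one level per divisor, so equal partial quotients over the same remaining elements are explored once.
-- outside the precondition, e.g. on div_check([0, 1], 0): A returns True, B raises ZeroDivisionError
import Mathlib
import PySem

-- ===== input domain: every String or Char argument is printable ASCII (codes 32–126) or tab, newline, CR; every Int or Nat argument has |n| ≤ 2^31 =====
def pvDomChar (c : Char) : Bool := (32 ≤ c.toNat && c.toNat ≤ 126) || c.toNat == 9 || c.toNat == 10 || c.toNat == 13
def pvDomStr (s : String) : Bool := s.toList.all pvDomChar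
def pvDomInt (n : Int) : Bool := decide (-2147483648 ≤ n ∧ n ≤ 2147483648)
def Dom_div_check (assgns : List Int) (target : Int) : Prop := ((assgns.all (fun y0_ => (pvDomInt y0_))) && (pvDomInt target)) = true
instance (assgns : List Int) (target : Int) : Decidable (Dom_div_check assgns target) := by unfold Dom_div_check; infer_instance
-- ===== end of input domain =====

-- B replaces A's permutation enumeration by a level-by-level search over deduplicated
-- (remaining elements, quotient so far) states: a different algorithm, same return value.

-- ===== PORT A =====
-- A: for each permutation of assgns, chain floor-divisions left to right and compare with target.
def div_check (assgns : List Int) (target : Int) : Bool :=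
  (PySem.List.permutations assgns assgns.length).any (fun perm =>
    (PySem.List.pyRange 1 (PySem.List.len assgns) 1).foldl
      (fun quotient ind => PySem.Int.floordiv quotient (PySem.List.pyGetD perm ind 0))
      (PySem.List.pyGetD perm 0 0) == target)
-- pyGetD with default 0: perm[0] only raises for assgns = [], which Pre_ excludes.

-- ===== PORT B =====
-- rem[:j] + rem[j+1:]
def pvRemoveAt (xs : List Int) (j : Int) : List Int :=
  PySem.List.slice xs none (some j) ++ PySem.List.slice xs (some (j + 1)) none

-- the initial state set {(a[:i] + a[i+1:], v) for i, v in enumerate(a)}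
def pvInit (assgns : List Int) : PySem.Set (List Int × Int) :=
  PySem.Set.ofList ((PySem.List.enumerate assgns 0).map (fun iv => (pvRemoveAt assgns iv.1, iv.2)))

-- one pass of the loop body: nxt = set(); for rem, val in states: for j, d in enumerate(rem): nxt.add(...)
def pvStep (states : PySem.Set (List Int × Int)) : PySem.Set (List Int × Int) :=
  states.foldl
    (fun nxt rv =>
      (PySem.List.enumerate rv.1 0).foldl
        (fun nxt jd => PySem.Set.add nxt (pvRemoveAt rv.1 jd.1, PySem.Int.floordiv rv.2 jd.2))
        nxt)
    PySem.Set.empty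

def div_check_alt (assgns : List Int) (target : Int) : Bool :=
  let states :=
    (PySem.List.pyRange 0 (PySem.List.len assgns - 1) 1).foldl
      (fun st _ => pvStep st) (pvInit assgns)
  states.any (fun rv => rv.2 == target)

-- ===== PRECONDITION & SPEC =====
-- Pre_ excludes the empty list, on which A raises IndexError, and multi-element lists containing 0,
-- on which A raises ZeroDivisionError except when an earlier permutation already happens to reach
-- the target (an accident of enumeration order); B raises ZeroDivisionError on all of those lists.
def Pre_div_check (assgns : List Int) (target : Int) : Prop :=
  assgns ≠ [] ∧ (assgns.length = 1 ∨ ¬ (0 : Int) ∈ assgns)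
instance (assgns : List Int) (target : Int) : Decidable (Pre_div_check assgns target) := by
  unfold Pre_div_check; infer_instance

def pvWitness_div_check : List Int × Int := ([2, 1], 2)

def Spec_div_check (assgns : List Int) (target : Int) (out : Bool) : Prop := out = div_check_alt assgns target
instance (assgns : List Int) (target : Int) (out : Bool) : Decidable (Spec_div_check assgns target out) := by unfold Spec_div_check; infer_instance

-- ===== CLAIM (what is proved, stated in full; the proofs are below) =====
def Claim_equal_div_check : Prop := ∀ (assgns : List Int) (target : Int), Dom_div_check assgns target → Pre_div_check assgns target → Spec_div_check assgns target (div_check assgns target)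

-- ===== LEMMAS AND PROOFS =====

-- the chained quotient of a nonempty sequence h :: t
def chainDiv (h : Int) (t : List Int) : Int := t.foldl PySem.Int.floordiv h

-- converse of PySem.List.perm_of_mem_permutations
theorem mem_permutations_of_perm {xs p : List Int} (h : p.Perm xs) :
    p ∈ PySem.List.permutations xs xs.length := by
  induction p generalizing xs with
  | nil =>
      have : xs = [] := (List.Perm.nil_eq h).symm
      subst this
      simp [PySem.List.permutations_zero]
  | cons a p' ih =>
      have ha : a ∈ xs := h.mem_iff.mp List.mem_cons_self
      obtain ⟨i, hi, rfl⟩ := List.mem_iff_getElem.mp ha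
      have hlen : xs.length = p'.length + 1 := by simpa using h.length_eq.symm
      have hperm : p'.Perm (xs.eraseIdx i) :=
        (h.trans (List.getElem_cons_eraseIdx_perm hi).symm).cons_inv
      have hlen' : (xs.eraseIdx i).length = p'.length := by
        rw [List.length_eraseIdx_of_lt hi]; omega
      rw [hlen, PySem.List.permutations_succ]
      apply List.mem_flatMap.mpr
      refine ⟨(i : Nat), List.mem_range.mpr hi, ?_⟩
      rw [List.getElem?_eq_getElem hi]
      apply List.mem_map.mpr
      refine ⟨p', ?_, rfl⟩
      have := ih hperm
      rwa [hlen'] at this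

-- A's inner loop on a permutation h :: t computes the chained quotient
theorem A_val (assgns : List Int) (h : Int) (t : List Int)
    (hlen : (h :: t).length = assgns.length) :
    (PySem.List.pyRange 1 (PySem.List.len assgns) 1).foldl
      (fun q ind => PySem.Int.floordiv q (PySem.List.pyGetD (h :: t) ind 0))
      (PySem.List.pyGetD (h :: t) 0 0) = chainDiv h t := by
  have hlen2 : PySem.List.len assgns = PySem.List.len (h :: t) := by
    simp [PySem.List.len_eq, hlen]
  rw [hlen2, PySem.List.pyGetD_zero_cons,
    PySem.List.foldl_pyRange_pyGetD (xs := h :: t) (a := 1) (d := 0)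
      (f := PySem.Int.floordiv) (init := h) (by norm_num)]
  simp [chainDiv]

-- A returns true iff some permutation h :: t of assgns chains to target
theorem A_iff (assgns : List Int) (target : Int) (hne : assgns ≠ []) :
    div_check assgns target = true ↔
      ∃ h t, (h :: t).Perm assgns ∧ chainDiv h t = target := by
  rw [div_check, List.any_eq_true]
  constructor
  · rintro ⟨perm, hmem, hval⟩
    have hp := PySem.List.perm_of_mem_permutations hmem
    cases perm with
    | nil => exact absurd hp.nil_eq (Ne.symm hne)
    | cons h t =>
        refine ⟨h, t, hp, ?_⟩
        rw [A_val assgns h t hp.length_eq] at hval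
        exact beq_iff_eq.mp hval
  · rintro ⟨h, t, hp, hval⟩
    refine ⟨h :: t, mem_permutations_of_perm hp, ?_⟩
    rw [A_val assgns h t hp.length_eq]
    exact beq_iff_eq.mpr hval

-- membership through a fold of Set.add over a list
theorem mem_foldl_add {α β : Type} [BEq α] [LawfulBEq α] (g : β → α) (l : List β)
    (s : PySem.Set α) (y : α) :
    y ∈ l.foldl (fun s x => PySem.Set.add s (g x)) s ↔ y ∈ s ∨ ∃ x ∈ l, y = g x := by
  induction l generalizing s with
  | nil => simp
  | cons b l ih => simp [ih, PySem.Set.mem_add, or_assoc]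

theorem mem_enumerate (xs : List Int) (s : Int) (p : Int × Int) :
    p ∈ PySem.List.enumerate xs s ↔ ∃ j : Nat, ∃ h : j < xs.length, p = (s + j, xs[j]) := by
  induction xs generalizing s with
  | nil => simp [PySem.List.enumerate_nil]
  | cons x xs ih =>
      simp only [PySem.List.enumerate_cons, List.mem_cons, ih]
      constructor
      · rintro (rfl | ⟨j, hj, rfl⟩)
        · exact ⟨0, by simp, by simp⟩
        · refine ⟨j + 1, by simpa using hj, ?_⟩
          simp only [List.getElem_cons_succ]
          congr 1
          push_cast
          ring
      · rintro ⟨j, hj, rfl⟩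
        cases j with
        | zero => left; simp
        | succ j =>
            right
            refine ⟨j, by simpa using hj, ?_⟩
            simp only [List.getElem_cons_succ]
            congr 1
            push_cast
            ring

theorem pvRemoveAt_natCast (xs : List Int) (j : Nat) : pvRemoveAt xs (j : Int) = xs.eraseIdx j := by
  rw [pvRemoveAt, show ((j : Int) + 1) = ((j + 1 : Nat) : Int) by push_cast; ring,
    PySem.List.slice_to_natCast, PySem.List.slice_from_natCast, List.eraseIdx_eq_take_drop_succ]

theorem mem_pvStep_aux (l : List (List Int × Int)) (s0 : PySem.Set (List Int × Int))
    (y : List Int × Int) :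
    y ∈ l.foldl
        (fun nxt rv =>
          (PySem.List.enumerate rv.1 0).foldl
            (fun nxt jd => PySem.Set.add nxt (pvRemoveAt rv.1 jd.1, PySem.Int.floordiv rv.2 jd.2))
            nxt) s0 ↔
      y ∈ s0 ∨ ∃ rv ∈ l, ∃ jd ∈ PySem.List.enumerate rv.1 0,
        y = (pvRemoveAt rv.1 jd.1, PySem.Int.floordiv rv.2 jd.2) := by
  induction l generalizing s0 with
  | nil => simp
  | cons rv l ih =>
      simp only [List.foldl_cons, ih, mem_foldl_add, List.mem_cons]
      constructor
      · rintro ((h | h) | h)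
        · exact Or.inl h
        · exact Or.inr ⟨rv, Or.inl rfl, by simpa using h⟩
        · obtain ⟨rv', h1, h2⟩ := h
          exact Or.inr ⟨rv', Or.inr h1, h2⟩
      · rintro (h | ⟨rv', (rfl | h1), h2⟩)
        · exact Or.inl (Or.inl h)
        · exact Or.inl (Or.inr (by simpa using h2))
        · exact Or.inr ⟨rv', h1, h2⟩

theorem mem_pvStep (S : PySem.Set (List Int × Int)) (y : List Int × Int) :
    y ∈ pvStep S ↔ ∃ rv ∈ S, ∃ jd ∈ PySem.List.enumerate rv.1 0,
      y = (pvRemoveAt rv.1 jd.1, PySem.Int.floordiv rv.2 jd.2) := by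
  rw [pvStep, mem_pvStep_aux]
  simp [PySem.Set.empty]

-- d can be inserted into the sublist rem so that the result is still a sublist
theorem exists_insertIdx_sublist :
    ∀ (assgns rem : List Int) (d : Int), rem.Sublist assgns → (d :: rem).Subperm assgns →
      ∃ j ≤ rem.length, (rem.insertIdx j d).Sublist assgns := by
  intro assgns
  induction assgns with
  | nil =>
      intro rem d _ hsp
      have := hsp.length_le
      simp at this
  | cons a rest ih =>
      intro rem d hsub hsp
      rcases List.sublist_cons_iff.mp hsub with h | ⟨t, rfl, h⟩
      · by_cases hda : d = a
        · subst hda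
          exact ⟨0, Nat.zero_le _, by simpa using List.Sublist.cons₂ d h⟩
        · have hsp' : (d :: rem).Subperm rest := by
            rw [List.subperm_ext_iff] at hsp ⊢
            intro x hx
            have hc := hsp x hx
            have hcr := List.Sublist.count_le x h
            by_cases hax : a = x <;> by_cases hdx : d = x <;>
              simp [hax, hdx] at hc ⊢ <;>
              first
                | (exfalso; exact hda (hdx.trans hax.symm))
                | omega
          obtain ⟨j, hj, hs⟩ := ih rem d h hsp'
          exact ⟨j, hj, hs.cons a⟩
      · have hsp' : (d :: t).Subperm rest := by
          rw [List.subperm_ext_iff] at hsp ⊢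
          intro x hx
          have hc : (d :: a :: t).count x ≤ (a :: rest).count x := by
            apply hsp x
            rcases List.mem_cons.mp hx with rfl | h'
            · exact List.mem_cons_self
            · exact List.mem_cons_of_mem _ (List.mem_cons_of_mem _ h')
          by_cases hax : a = x <;> by_cases hdx : d = x <;>
            simp [hax, hdx] at hc ⊢ <;> omega
        obtain ⟨j, hj, hs⟩ := ih t d h hsp'
        refine ⟨j + 1, by simpa using hj, ?_⟩
        simpa [List.insertIdx] using List.Sublist.cons₂ a hs

-- the loop invariant: the state set after k iterations
theorem pvStep_iterate_mem (assgns : List Int) (k : Nat) (rem : List Int) (v : Int) :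
    (rem, v) ∈ pvStep^[k] (pvInit assgns) ↔
      rem.Sublist assgns ∧
        ∃ h t, t.length = k ∧ ((h :: t) ++ rem).Perm assgns ∧ chainDiv h t = v := by
  induction k generalizing rem v with
  | zero =>
      simp only [Function.iterate_zero, id_eq, pvInit, PySem.Set.mem_ofList, List.mem_map]
      constructor
      · rintro ⟨iv, hiv, heq⟩
        obtain ⟨j, hj, rfl⟩ := (mem_enumerate assgns 0 iv).mp hiv
        simp only [zero_add] at heq
        rw [Prod.mk.injEq] at heq
        obtain ⟨hrem, hv⟩ := heq
        subst hrem
        subst hv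
        rw [pvRemoveAt_natCast]
        refine ⟨List.eraseIdx_sublist assgns j, assgns[j], [], rfl, ?_, rfl⟩
        simpa using List.getElem_cons_eraseIdx_perm hj
      · rintro ⟨hsub, h, t, ht, hperm, hchain⟩
        rw [List.length_eq_zero_iff] at ht
        subst ht
        simp only [List.cons_append, List.nil_append] at hperm
        obtain ⟨j, hj, hs⟩ :=
          exists_insertIdx_sublist assgns rem h hsub hperm.subperm
        have hlen : (rem.insertIdx j h).length = assgns.length := by
          rw [List.length_insertIdx_of_le_length hj h]
          simpa using hperm.length_eq
        have heq : rem.insertIdx j h = assgns := (List.Sublist.length_eq hs).mp hlen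
        have hjlt : j < assgns.length := by
          rw [← heq, List.length_insertIdx_of_le_length hj h]; omega
        refine ⟨(((j : Nat) : Int), assgns[j]), ?_, ?_⟩
        · exact (mem_enumerate assgns 0 _).mpr ⟨j, hjlt, by simp⟩
        · rw [pvRemoveAt_natCast]
          have h1 : assgns.eraseIdx j = rem := by
            rw [← heq]; exact List.eraseIdx_insertIdx_self h
          have h2 : assgns[j] = h := by
            subst heq
            exact List.getElem_insertIdx_self hjlt
          simp only [chainDiv, List.foldl_nil] at hchain
          simp [h1, h2, hchain]
  | succ k ih =>
      rw [Function.iterate_succ_apply', mem_pvStep]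
      constructor
      · rintro ⟨⟨r, w⟩, hrw, jd, hjd, heq⟩
        obtain ⟨j, hj, rfl⟩ := (mem_enumerate r 0 jd).mp hjd
        simp only [zero_add] at heq
        rw [Prod.mk.injEq] at heq
        obtain ⟨hrem, hv⟩ := heq
        subst hrem
        subst hv
        obtain ⟨hsub, h, t, ht, hperm, hchain⟩ := (ih r w).mp hrw
        rw [pvRemoveAt_natCast]
        refine ⟨(List.eraseIdx_sublist r j).trans hsub, h, t ++ [r[j]], by simp [ht], ?_, ?_⟩
        · have e1 : ((h :: (t ++ [r[j]])) ++ r.eraseIdx j)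
              = (h :: t) ++ ([r[j]] ++ r.eraseIdx j) := by simp
          rw [e1]
          exact ((List.Perm.append_left (h :: t)
            (List.getElem_cons_eraseIdx_perm hj))).trans hperm
        · simp [chainDiv, hchain.symm]
      · rintro ⟨hsub, h, t', ht', hperm, hchain⟩
        have htne : t' ≠ [] := by intro e; rw [e] at ht'; simp at ht'
        set t := t'.dropLast with htdef
        set d := t'.getLast htne with hddef
        have hts : t ++ [d] = t' := List.dropLast_concat_getLast htne
        have htlen : t.length = k := by
          have := congrArg List.length hts
          simp at this
          omega
        have hdsub : (d :: rem).Subperm assgns := by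
          rw [List.subperm_ext_iff]
          intro x hx
          rw [← hperm.count_eq, ← hts]
          by_cases hdx : d = x <;> by_cases hhx : h = x <;>
            simp [List.count_append, hdx, hhx] <;> omega
        obtain ⟨j, hj, hs⟩ := exists_insertIdx_sublist assgns rem d hsub hdsub
        have hjlt : j < (rem.insertIdx j d).length := by
          rw [List.length_insertIdx_of_le_length hj d]; omega
        have hmem : (rem.insertIdx j d, chainDiv h t) ∈ pvStep^[k] (pvInit assgns) := by
          apply (ih _ _).mpr
          refine ⟨hs, h, t, htlen, ?_, rfl⟩
          have e1 : ((h :: t) ++ (d :: rem)) = ((h :: t') ++ rem) := by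
            rw [← hts]; simp
          exact ((List.Perm.append_left (h :: t)
            (List.perm_insertIdx d rem hj))).trans (e1 ▸ hperm)
        have h2 : (rem.insertIdx j d)[j] = d := List.getElem_insertIdx_self hjlt
        refine ⟨(rem.insertIdx j d, chainDiv h t), hmem,
          (((j : Nat) : Int), d), ?_, ?_⟩
        · exact (mem_enumerate _ 0 _).mpr ⟨j, hjlt, by simp [h2]⟩
        · have h1 : (rem.insertIdx j d).eraseIdx j = rem := List.eraseIdx_insertIdx_self d
          rw [pvRemoveAt_natCast]
          simp only [h1]
          have : chainDiv h t' = PySem.Int.floordiv (chainDiv h t) d := by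
            rw [← hts]; simp [chainDiv]
          rw [← hchain, this]

theorem foldl_pyRange_const {α : Type} (f : α → α) (init : α) (k : Nat) :
    (PySem.List.pyRange 0 (k : Int) 1).foldl (fun st _ => f st) init = f^[k] init := by
  induction k generalizing init with
  | zero => simp [PySem.List.pyRange_one_eq_nil]
  | succ k ih =>
      rw [show ((k + 1 : Nat) : Int) = (k : Int) + 1 by push_cast; ring,
        PySem.List.pyRange_one_succ_right (by positivity), List.foldl_append]
      simp [Function.iterate_succ_apply', ih]

-- B returns true iff some permutation h :: t of assgns chains to target
theorem B_iff (assgns : List Int) (target : Int) (hne : assgns ≠ []) :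
    div_check_alt assgns target = true ↔
      ∃ h t, (h :: t).Perm assgns ∧ chainDiv h t = target := by
  have hn : 1 ≤ assgns.length := List.length_pos_iff.mpr hne
  rw [div_check_alt]
  simp only [PySem.List.len_eq]
  rw [show ((assgns.length : Int) - 1) = ((assgns.length - 1 : Nat) : Int) by
      push_cast [hn]; ring,
    foldl_pyRange_const, List.any_eq_true]
  constructor
  · rintro ⟨⟨rem, v⟩, hmem, hval⟩
    obtain ⟨hsub, h, t, ht, hperm, hchain⟩ := (pvStep_iterate_mem assgns _ rem v).mp hmem
    have hlenp := hperm.length_eq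
    simp at hlenp
    have hrem : rem = [] := by
      rw [List.length_eq_zero_iff.symm]; omega
    subst hrem
    refine ⟨h, t, by simpa using hperm, ?_⟩
    rw [hchain]
    exact beq_iff_eq.mp hval
  · rintro ⟨h, t, hperm, hchain⟩
    have hlenp := hperm.length_eq
    simp at hlenp
    refine ⟨([], target), ?_, by simp⟩
    apply (pvStep_iterate_mem assgns _ [] target).mpr
    exact ⟨List.nil_sublist assgns, h, t, by omega, by simpa using hperm, hchain⟩

-- ===== VERDICT (by name: the statement is the Claim_ definition above) =====
theorem div_check_spec : Claim_equal_div_check := by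
  intro assgns target _ hpre
  unfold Spec_div_check
  rw [Bool.eq_iff_iff, A_iff assgns target hpre.1, B_iff assgns target hpre.1]
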